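-- pv_equiv track=rewrite | github.com/Katemar007/recipes_app | backend/app/recipe_db_service.py | flatten_ingredient_section_tuples
-- ===== SOURCE A (Python) =====
-- def flatten_ingredient_section_tuples(
--     sections: list[tuple[str, str]],
-- ) -> list[str]:
--     """Importer helper: (section_title, newline_body) -> flat trimmed lines."""
--     lines: list[str] = []
--     for _title, body in sections:
--         for raw in (body or "").splitlines():
--             s = raw.strip()
--             if s:
--                 lines.append(s)
--     return lines
-- ===== SOURCE B (Python) =====
-- def flatten_ingredient_section_tuples(
--     sections: list[tuple[str, str]],
-- ) -> list[str]:
--     """Importer helper: (section_title, newline_body) -> flat trimmed lines."""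
--     text = "\n".join(body for _title, body in sections)
--     return [s for raw in text.splitlines() if (s := raw.strip())]
-- ===== Notes on version B (the rewrite author's own statement) =====
-- stated objective: simpler
-- what changed: Replaces the nested per-section loop with a single join of all bodies on "\n" followed by one flat splitlines/strip/filter comprehension; blank lines created at body boundaries (or by "\r"+"\n" merging) are absorbed by the non-empty filter.
import Mathlib
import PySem

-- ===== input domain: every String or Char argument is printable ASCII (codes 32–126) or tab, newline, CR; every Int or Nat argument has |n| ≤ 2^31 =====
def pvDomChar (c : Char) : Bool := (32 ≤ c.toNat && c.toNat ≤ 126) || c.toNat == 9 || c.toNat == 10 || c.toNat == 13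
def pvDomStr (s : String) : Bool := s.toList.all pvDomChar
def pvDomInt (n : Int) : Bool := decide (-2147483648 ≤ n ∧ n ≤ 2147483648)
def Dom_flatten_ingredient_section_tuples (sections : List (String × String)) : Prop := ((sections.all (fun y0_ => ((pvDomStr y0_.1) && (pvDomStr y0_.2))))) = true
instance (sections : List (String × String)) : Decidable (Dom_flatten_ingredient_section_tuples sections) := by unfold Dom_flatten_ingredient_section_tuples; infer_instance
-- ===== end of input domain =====

-- B joins all bodies with "\n" and does one flat splitlines/strip/filter pass instead of A's nested per-section loop (objective: simpler).

-- ===== PORT A =====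
def flatten_ingredient_section_tuples (sections : List (String × String)) : List String :=
  sections.foldl (fun lines p =>
    (PySem.Str.splitlines (if p.2 = "" then "" else p.2)).foldl (fun lines raw =>
      let s := PySem.Str.strip raw
      if s ≠ "" then lines ++ [s] else lines) lines) []

-- ===== PORT B =====
def flatten_ingredient_section_tuples_alt (sections : List (String × String)) : List String :=
  let text := PySem.Str.join "\n" (sections.map (fun p => p.2))
  (PySem.Str.splitlines text).filterMap (fun raw =>
    let s := PySem.Str.strip raw
    if s = "" then none else some s)

-- ===== PRECONDITION & SPEC =====
def Spec_flatten_ingredient_section_tuples (sections : List (String × String)) (out : List String) : Prop := out = flatten_ingredient_section_tuples_alt sections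
instance (sections : List (String × String)) (out : List String) : Decidable (Spec_flatten_ingredient_section_tuples sections out) := by unfold Spec_flatten_ingredient_section_tuples; infer_instance

-- ===== CLAIM (what is proved, stated in full; the proofs are below) =====
def Claim_equal_flatten_ingredient_section_tuples : Prop := ∀ (sections : List (String × String)), Dom_flatten_ingredient_section_tuples sections → Spec_flatten_ingredient_section_tuples sections (flatten_ingredient_section_tuples sections)

-- ===== LEMMAS AND PROOFS =====

-- The char-level "keep the stripped line if non-empty" step and its map over a line list.
def pvSNE (cs : List Char) : Option (List Char) :=
  if PySem.Chars.strip cs = [] then none else some (PySem.Chars.strip cs)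

def pvFf (xs : List (List Char)) : List (List Char) := xs.filterMap pvSNE

-- The concrete line-break predicate used inside PySem.Chars.splitlines.
def pvIsB : Char → Bool := fun c =>
  have n := c.toNat
  decide (n = 10) || decide (n = 13) || decide (n = 11) || decide (n = 12) || decide (n = 28) ||
    decide (n = 29) || decide (n = 30) || decide (n = 133) || decide (n = 8232) || decide (n = 8233)

theorem pv_splitlines_eq (s : List Char) :
    PySem.Chars.splitlines s = PySem.Chars.splitlines.go pvIsB s [] [] := rfl

-- one-step unfoldings of splitlines.go
theorem pv_go_nil (isB : Char → Bool) (cur : List Char) (acc : List (List Char)) :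
    PySem.Chars.splitlines.go isB [] cur acc =
      if cur.isEmpty then acc.reverse else (cur.reverse :: acc).reverse := by
  rw [PySem.Chars.splitlines.go]

theorem pv_go_crlf (isB : Char → Bool) (rest cur : List Char) (acc : List (List Char)) :
    PySem.Chars.splitlines.go isB ('\x0d' :: '\n' :: rest) cur acc =
      PySem.Chars.splitlines.go isB rest [] (cur.reverse :: acc) := by
  rw [PySem.Chars.splitlines.go]

theorem pv_go_brk (isB : Char → Bool) (c : Char) (rest cur : List Char) (acc : List (List Char))
    (h : isB c = true) (hc : c ≠ '\x0d') :
    PySem.Chars.splitlines.go isB (c :: rest) cur acc =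
      PySem.Chars.splitlines.go isB rest [] (cur.reverse :: acc) := by
  rw [PySem.Chars.splitlines.go]
  split
  all_goals first
    | rfl
    | (intro r h1 h2; exact hc h1)

theorem pv_go_nb (isB : Char → Bool) (c : Char) (rest cur : List Char) (acc : List (List Char))
    (h : isB c = false) (hc : c ≠ '\x0d') :
    PySem.Chars.splitlines.go isB (c :: rest) cur acc =
      PySem.Chars.splitlines.go isB rest (c :: cur) acc := by
  rw [PySem.Chars.splitlines.go]
  split
  all_goals first
    | rfl
    | (intro r h1 h2; exact hc h1)
    | (rename_i hb; rw [h] at hb; exact absurd hb (by simp))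

-- '\r' not followed by '\n' is a plain break
theorem pv_go_cr (isB : Char → Bool) (rest cur : List Char) (acc : List (List Char))
    (h : isB '\x0d' = true) (hr : ∀ t, rest ≠ '\n' :: t) :
    PySem.Chars.splitlines.go isB ('\x0d' :: rest) cur acc =
      PySem.Chars.splitlines.go isB rest [] (cur.reverse :: acc) := by
  rw [PySem.Chars.splitlines.go]
  split
  all_goals first
    | rfl
    | (intro r h1 h2; exact hr _ h2)

-- filterMap splits off the head
theorem pv_ffcons (a : List Char) (l : List (List Char)) :
    pvFf (a :: l) = pvFf [a] ++ pvFf l := by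
  cases h : pvSNE a <;> simp [pvFf, h]

theorem pv_ffapp (xs ys : List (List Char)) : pvFf (xs ++ ys) = pvFf xs ++ pvFf ys := by
  simp [pvFf]

-- the accumulator is a reversed prefix of the result
theorem pv_go_acc : ∀ (n : Nat) (s : List Char), s.length ≤ n → ∀ (cur : List Char) (acc : List (List Char)),
    PySem.Chars.splitlines.go pvIsB s cur acc =
      acc.reverse ++ PySem.Chars.splitlines.go pvIsB s cur [] := by
  intro n
  induction n with
  | zero =>
    intro s hs cur acc
    have : s = [] := List.length_eq_zero_iff.mp (Nat.le_antisymm hs (Nat.zero_le _))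
    subst this
    rw [pv_go_nil, pv_go_nil]
    by_cases h : cur.isEmpty <;> simp [h]
  | succ n ih =>
    intro s hs cur acc
    cases s with
    | nil =>
      rw [pv_go_nil, pv_go_nil]
      by_cases h : cur.isEmpty <;> simp [h]
    | cons c t =>
      by_cases hc : c = '\x0d'
      · subst hc
        cases t with
        | nil =>
          rw [pv_go_cr pvIsB [] cur acc (by decide) (fun u h => (List.cons_ne_nil _ _) h.symm),
              pv_go_cr pvIsB [] cur [] (by decide) (fun u h => (List.cons_ne_nil _ _) h.symm)]
          rw [pv_go_nil, pv_go_nil]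
          simp
        | cons d t' =>
          by_cases hd : d = '\n'
          · subst hd
            rw [pv_go_crlf, pv_go_crlf]
            rw [ih t' (by simp at hs; omega) [] (cur.reverse :: acc),
                ih t' (by simp at hs; omega) [] [cur.reverse]]
            simp
          · have hne : ∀ u, (d :: t') ≠ '\n' :: u := by
              intro u h
              injection h with h1 _
              exact hd h1
            rw [pv_go_cr pvIsB (d :: t') cur acc (by decide) hne,
                pv_go_cr pvIsB (d :: t') cur [] (by decide) hne]
            rw [ih (d :: t') (by simp at hs ⊢; omega) [] (cur.reverse :: acc),
                ih (d :: t') (by simp at hs ⊢; omega) [] [cur.reverse]]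
            simp
      · by_cases hb : pvIsB c
        · rw [pv_go_brk pvIsB c t cur acc hb hc, pv_go_brk pvIsB c t cur [] hb hc]
          rw [ih t (by simp at hs; omega) [] (cur.reverse :: acc),
              ih t (by simp at hs; omega) [] [cur.reverse]]
          simp
        · rw [pv_go_nb pvIsB c t cur acc (by simpa using hb) hc,
              pv_go_nb pvIsB c t cur [] (by simpa using hb) hc]
          exact ih t (by simp at hs; omega) (c :: cur) acc

-- the glue lemma: after strip/non-empty filtering, a '\n' splice splits cleanly
theorem pv_glue : ∀ (n : Nat) (b : List Char), b.length ≤ n → ∀ (rest cur : List Char),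
    pvFf (PySem.Chars.splitlines.go pvIsB (b ++ '\n' :: rest) cur []) =
      pvFf (PySem.Chars.splitlines.go pvIsB b cur []) ++
        pvFf (PySem.Chars.splitlines.go pvIsB rest [] []) := by
  intro n
  induction n with
  | zero =>
    intro b hb rest cur
    have : b = [] := List.length_eq_zero_iff.mp (Nat.le_antisymm hb (Nat.zero_le _))
    subst this
    rw [List.nil_append, pv_go_brk pvIsB '\n' rest cur [] (by decide) (by decide),
        pv_go_acc rest.length rest le_rfl [] [cur.reverse], pv_go_nil]
    rw [List.reverse_cons, List.reverse_nil, List.nil_append, pv_ffapp]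
    by_cases h : cur.isEmpty
    · have hc0 : cur = [] := by simpa using h
      subst hc0
      have h0 : pvFf [([] : List Char)] = pvFf [] := by decide
      simp [h, h0]
    · simp [h]
  | succ n ih =>
    intro b hb rest cur
    cases b with
    | nil => exact ih [] (by simp) rest cur
    | cons c t =>
      by_cases hc : c = '\x0d'
      · subst hc
        cases t with
        | nil =>
          simp only [List.cons_append, List.nil_append]
          rw [pv_go_crlf,
              pv_go_cr pvIsB [] cur [] (by decide) (fun u h => (List.cons_ne_nil _ _) h.symm),
              pv_go_nil, pv_go_acc rest.length rest le_rfl [] [cur.reverse]]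
          rw [List.reverse_cons, List.reverse_nil, List.nil_append, pv_ffapp]
          simp [pvFf, pvSNE]
        | cons d t' =>
          by_cases hd : d = '\n'
          · subst hd
            rw [List.cons_append, List.cons_append, pv_go_crlf, pv_go_crlf,
                pv_go_acc (t' ++ '\n' :: rest).length _ le_rfl [] [cur.reverse],
                pv_go_acc t'.length t' le_rfl [] [cur.reverse]]
            rw [List.reverse_cons, List.reverse_nil, List.nil_append, List.singleton_append,
                pv_ffcons, pv_ffapp, ih t' (by simp at hb; omega) rest []]
            simp
          · have hne : ∀ u, (d :: t') ≠ '\n' :: u := by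
              intro u h
              injection h with h1 _
              exact hd h1
            have hne' : ∀ u, (d :: t') ++ '\n' :: rest ≠ '\n' :: u := by
              intro u h
              rw [List.cons_append] at h
              injection h with h1 _
              exact hd h1
            rw [List.cons_append, pv_go_cr pvIsB _ cur [] (by decide) hne',
                pv_go_cr pvIsB (d :: t') cur [] (by decide) hne,
                pv_go_acc ((d :: t') ++ '\n' :: rest).length _ le_rfl [] [cur.reverse],
                pv_go_acc (d :: t').length _ le_rfl [] [cur.reverse]]
            rw [List.reverse_cons, List.reverse_nil, List.nil_append, List.singleton_append,
                pv_ffcons, pv_ffapp, ih (d :: t') (by simp at hb ⊢; omega) rest []]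
            simp
      · by_cases hbk : pvIsB c
        · rw [List.cons_append, pv_go_brk pvIsB c _ cur [] hbk hc,
              pv_go_brk pvIsB c t cur [] hbk hc,
              pv_go_acc (t ++ '\n' :: rest).length _ le_rfl [] [cur.reverse],
              pv_go_acc t.length t le_rfl [] [cur.reverse]]
          rw [List.reverse_cons, List.reverse_nil, List.nil_append, List.singleton_append,
              pv_ffcons, pv_ffapp, ih t (by simp at hb; omega) rest []]
          simp
        · rw [List.cons_append, pv_go_nb pvIsB c _ cur [] (by simpa using hbk) hc,
              pv_go_nb pvIsB c t cur [] (by simpa using hbk) hc]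
          exact ih t (by simp at hb; omega) rest (c :: cur)

-- filtered splitlines of an "\n"-join is the concatenation of the per-body filtered splitlines
theorem pv_join_split : ∀ (bodies : List (List Char)),
    pvFf (PySem.Chars.splitlines (PySem.Chars.join ['\n'] bodies)) =
      (bodies.map (fun b => pvFf (PySem.Chars.splitlines b))).flatten := by
  intro bodies
  induction bodies with
  | nil => simp [PySem.Chars.join, List.intercalate, pv_splitlines_eq, pv_go_nil, pvFf]
  | cons b bs ih =>
    match bs with
    | [] => simp [PySem.Chars.join, List.intercalate]
    | b' :: bs' =>
      have hj : PySem.Chars.join ['\n'] (b :: b' :: bs') =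
          b ++ '\n' :: PySem.Chars.join ['\n'] (b' :: bs') := by
        simp [PySem.Chars.join, List.intercalate]
      rw [hj, pv_splitlines_eq, pv_glue b.length b le_rfl, ← pv_splitlines_eq,
          ← pv_splitlines_eq, ih]
      simp

-- the string-level strip/non-empty step matches pvSNE through String.ofList
theorem pv_SNE_bridge (cs : List Char) :
    (fun raw => let s := PySem.Str.strip raw; if s = "" then none else some s) (String.ofList cs) =
      (pvSNE cs).map String.ofList := by
  have hst : PySem.Str.strip (String.ofList cs) = String.ofList (PySem.Chars.strip cs) := by
    have h1 := PySem.Str.toList_strip (String.ofList cs)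
    rw [String.toList_ofList] at h1
    have := congrArg String.ofList h1
    rwa [String.ofList_toList] at this
  simp only [hst]
  by_cases h : PySem.Chars.strip cs = []
  · have h0 : String.ofList (PySem.Chars.strip cs) = "" := by rw [h]
    rw [h0]
    simp [pvSNE, h]
  · have h0 : String.ofList (PySem.Chars.strip cs) ≠ "" := by
      intro hcon
      exact h (by simpa [String.toList_ofList] using congrArg String.toList hcon)
    rw [if_neg h0]
    simp [pvSNE, h]

-- string-level filterMap over ofList-mapped lines is the char-level pvFf
theorem pv_ff_bridge (l : List (List Char)) :
    (l.map String.ofList).filterMap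
        (fun raw => let s := PySem.Str.strip raw; if s = "" then none else some s) =
      (pvFf l).map String.ofList := by
  induction l with
  | nil => simp [pvFf]
  | cons x xs ihx =>
    simp only [List.map_cons, List.filterMap_cons, pv_SNE_bridge x]
    cases hx : pvSNE x
    · simpa [hx, pvFf] using ihx
    · simpa [hx, pvFf] using ihx

-- port B, expressed at the char level
theorem pv_alt_chars (sections : List (String × String)) :
    flatten_ingredient_section_tuples_alt sections =
      (pvFf (PySem.Chars.splitlines
        (PySem.Chars.join ['\n'] ((sections.map (fun p => p.2)).map String.toList)))).map String.ofList := by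
  unfold flatten_ingredient_section_tuples_alt
  simp only [PySem.Str.splitlines, PySem.Str.join, String.toList_ofList]
  exact pv_ff_bridge _

-- A's inner loop appends exactly the filtered lines
theorem pv_inner (xs : List String) : ∀ (init : List String),
    xs.foldl (fun lines raw =>
        let s := PySem.Str.strip raw
        if s ≠ "" then lines ++ [s] else lines) init =
      init ++ xs.filterMap (fun raw =>
        let s := PySem.Str.strip raw
        if s = "" then none else some s) := by
  induction xs with
  | nil => simp
  | cons x t ih =>
    intro init
    rw [List.foldl_cons, ih, List.filterMap_cons]
    by_cases h : PySem.Str.strip x = "" <;> simp [h]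

-- port A, expressed at the char level
theorem pv_a_chars (sections : List (String × String)) :
    flatten_ingredient_section_tuples sections =
      ((sections.map (fun p => p.2)).map
        (fun b => (pvFf (PySem.Chars.splitlines b.toList)).map String.ofList)).flatten := by
  unfold flatten_ingredient_section_tuples
  have h : ∀ (secs : List (String × String)) (init : List String),
      secs.foldl (fun lines p =>
          (PySem.Str.splitlines (if p.2 = "" then "" else p.2)).foldl (fun lines raw =>
            let s := PySem.Str.strip raw
            if s ≠ "" then lines ++ [s] else lines) lines) init =
        init ++ ((secs.map (fun p => p.2)).map
          (fun b => (pvFf (PySem.Chars.splitlines b.toList)).map String.ofList)).flatten := by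
    intro secs
    induction secs with
    | nil => simp
    | cons p t ih =>
      intro init
      have hbody : (if p.2 = "" then "" else p.2) = p.2 := by
        by_cases h : p.2 = "" <;> simp [h]
      have hsec : (PySem.Str.splitlines p.2).filterMap (fun raw =>
          let s := PySem.Str.strip raw
          if s = "" then none else some s) =
            (pvFf (PySem.Chars.splitlines p.2.toList)).map String.ofList := by
        rw [PySem.Str.splitlines]
        exact pv_ff_bridge _
      rw [List.foldl_cons, ih, hbody, pv_inner, hsec]
      simp
  rw [h sections []]
  simp

-- ===== VERDICT (by name: the statement is the Claim_ definition above) =====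
theorem flatten_ingredient_section_tuples_spec : Claim_equal_flatten_ingredient_section_tuples := by
  intro sections _
  unfold Spec_flatten_ingredient_section_tuples
  rw [pv_a_chars, pv_alt_chars, pv_join_split]
  simp [Function.comp_def]
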